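-- pv_equiv track=rewrite | github.com/SoheeCheon/personal_project | 알고리즘/프로그래머스/햄버거 만들기.py | solution
-- ===== SOURCE A (Python) =====
-- def solution(ingredient):
--     answer = 0
--     idx = 0
--     while idx < len(ingredient) - 2:
--         if ingredient[idx: idx+4] == [1,2,3,1]:
--             # 빵 - 야채 - 고기 - 빵 순은 리스트에서 제거하고 idx를 재정립한다.
--             del(ingredient[idx:idx+4])
--             # 현재 위치에서 한칸 전으로 가기위해 -2 = -3 + 1
--             idx -= 3
--             answer += 1
--         idx += 1
--     return answer
-- ===== SOURCE B (Python) =====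
-- def solution(ingredient):
--     # Single-pass stack: push each ingredient, pop a burger whenever the top four are 1,2,3,1.
--     # (Unlike A, this does not mutate its argument; the equivalence is about the return value.)
--     stack = []
--     answer = 0
--     for x in ingredient:
--         stack.append(x)
--         if stack[-4:] == [1, 2, 3, 1]:
--             del stack[-4:]
--             answer += 1
--     return answer
-- ===== Notes on version B (the rewrite author's own statement) =====
-- stated objective: faster
-- what changed: Replaces A's rescanning while-loop, which compares a fresh 4-slice at every index and deletes each matched [1,2,3,1] from the list (shifting the tail) before stepping the index back, by a single forward pass that maintains a stack and pops four elements whenever the stack top reads 1,2,3,1.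
import Mathlib
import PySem

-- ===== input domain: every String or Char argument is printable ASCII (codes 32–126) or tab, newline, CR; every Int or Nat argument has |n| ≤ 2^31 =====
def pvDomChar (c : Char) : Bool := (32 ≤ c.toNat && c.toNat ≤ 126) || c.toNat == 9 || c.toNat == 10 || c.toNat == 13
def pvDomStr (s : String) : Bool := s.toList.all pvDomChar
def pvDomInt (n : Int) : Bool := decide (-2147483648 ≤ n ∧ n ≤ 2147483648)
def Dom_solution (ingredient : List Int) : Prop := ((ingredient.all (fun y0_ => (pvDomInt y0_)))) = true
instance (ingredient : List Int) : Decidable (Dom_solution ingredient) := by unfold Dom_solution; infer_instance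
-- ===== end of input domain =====

-- B replaces A's delete-and-rescan while-loop by a single-pass stack.
-- A mutates its argument (del of a slice); B does not — the equivalence proved is about the return value only.

-- ===== PORT A =====
-- termination facts for the loop below (named so the loop's body stays a plain transcription);
-- the arithmetic is proved over plain variables first to keep the proof terms small
theorem solutionLoop_decArith1 (L c1 c2 : Nat) (idx : Int) (h4 : c2 - c1 = 4)
    (h1 : c1 ≤ L) (h2 : c2 ≤ L) :
    2 * (min c1 L + (L - max c1 c2)) + ((((min c1 L + (L - max c1 c2)) : Nat) : Int) - (idx - 3 + 1)).toNat
      < 2 * L + ((L : Int) - idx).toNat := by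
  have e2 : c2 = c1 + 4 := by omega
  subst e2
  rw [min_eq_left h1, max_eq_right (Nat.le_add_right c1 4)]
  obtain ⟨K, rfl⟩ : ∃ K, L = c1 + 4 + K := ⟨L - (c1 + 4), (Nat.add_sub_cancel' h2).symm⟩
  rw [Nat.add_sub_cancel_left]
  have hm1 : ((c1 + K : Nat) : Int) - (idx - 3 + 1) = (((c1 + K : Nat) : Int) - idx) + 2 := by
    ring
  have hm2 : ((c1 + 4 + K : Nat) : Int) - idx = (((c1 + K : Nat) : Int) - idx) + 4 := by
    push_cast; ring
  rw [hm1, hm2]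
  have hmono : ((((c1 + K : Nat) : Int) - idx) + 2).toNat ≤ ((((c1 + K : Nat) : Int) - idx) + 4).toNat :=
    Int.toNat_le_toNat (by linarith)
  calc 2 * (c1 + K) + ((((c1 + K : Nat) : Int) - idx) + 2).toNat
      ≤ 2 * (c1 + K) + ((((c1 + K : Nat) : Int) - idx) + 4).toNat := Nat.add_le_add_left hmono _
    _ < 2 * (c1 + 4 + K) + ((((c1 + K : Nat) : Int) - idx) + 4).toNat :=
        Nat.add_lt_add_right (by linarith) _

theorem solutionLoop_decArith2 (L : Nat) (idx : Int) (hlt : idx < (L : Int) - 2) :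
    2 * L + ((L : Int) - (idx + 1)).toNat < 2 * L + ((L : Int) - idx).toNat :=
  Nat.add_lt_add_left ((Int.toNat_lt_toNat (by linarith)).mpr (by linarith)) _

theorem solutionLoop_dec1 (l : List Int) (idx : Int)
    (hm : PySem.List.slice l (some idx) (some (idx + 4)) = ([1, 2, 3, 1] : List Int)) :
    2 * (l.take (PySem.List.clampIdx l.length idx) ++
          l.drop (max (PySem.List.clampIdx l.length idx) (PySem.List.clampIdx l.length (idx + 4)))).length +
        (((l.take (PySem.List.clampIdx l.length idx) ++
          l.drop (max (PySem.List.clampIdx l.length idx) (PySem.List.clampIdx l.length (idx + 4)))).length : Int)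
          - (idx - 3 + 1)).toNat
      < 2 * l.length + ((l.length : Int) - idx).toNat := by
  have hlen := PySem.List.length_slice l idx (idx + 4)
  rw [hm] at hlen
  simp only [List.length_cons, List.length_nil] at hlen
  simp only [List.length_append, List.length_take, List.length_drop]
  exact solutionLoop_decArith1 l.length (PySem.List.clampIdx l.length idx)
    (PySem.List.clampIdx l.length (idx + 4)) idx hlen.symm
    (PySem.List.clampIdx_le l.length idx) (PySem.List.clampIdx_le l.length (idx + 4))

theorem solutionLoop_dec2 (l : List Int) (idx : Int) (hlt : idx < (l.length : Int) - 2) :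
    2 * l.length + ((l.length : Int) - (idx + 1)).toNat
      < 2 * l.length + ((l.length : Int) - idx).toNat :=
  solutionLoop_decArith2 l.length idx hlt

-- A's while loop as recursion on the state (ingredient, idx, answer);
-- `del ingredient[idx:idx+4]` is Python slice deletion: remove positions [clampIdx idx, clampIdx (idx+4))
def solutionLoop (l : List Int) (idx : Int) (ans : Int) : Int :=
  if idx < (l.length : Int) - 2 then
    if PySem.List.slice l (some idx) (some (idx + 4)) = ([1, 2, 3, 1] : List Int) then
      solutionLoop
        (l.take (PySem.List.clampIdx l.length idx) ++
          l.drop (max (PySem.List.clampIdx l.length idx) (PySem.List.clampIdx l.length (idx + 4))))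
        (idx - 3 + 1) (ans + 1)
    else
      solutionLoop l (idx + 1) ans
  else
    ans
termination_by (2 * l.length + ((l.length : Int) - idx).toNat)
decreasing_by
  · rename_i hlt hm
    exact solutionLoop_dec1 l idx hm
  · rename_i hlt _
    exact solutionLoop_dec2 l idx hlt

def solution (ingredient : List Int) : Int := solutionLoop ingredient 0 0

-- ===== PORT B =====
-- one iteration of B's for-loop: push x, pop four when the top of the stack is [1,2,3,1]
-- (stack[-4:] on a stack shorter than 4 is the whole stack, exactly as Nat subtraction clamps)
def stepB (st : List Int × Int) (x : Int) : List Int × Int :=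
  let s := st.1 ++ [x]
  if s.drop (s.length - 4) = ([1, 2, 3, 1] : List Int) then (s.take (s.length - 4), st.2 + 1)
  else (s, st.2)

def solution_alt (ingredient : List Int) : Int := (ingredient.foldl stepB ([], 0)).2

-- ===== PRECONDITION & SPEC =====
def Spec_solution (ingredient : List Int) (out : Int) : Prop := out = solution_alt ingredient
instance (ingredient : List Int) (out : Int) : Decidable (Spec_solution ingredient out) := by unfold Spec_solution; infer_instance

-- ===== CLAIM (what is proved, stated in full; the proofs are below) =====
def Claim_equal_solution : Prop := ∀ (ingredient : List Int), Dom_solution ingredient → Spec_solution ingredient (solution ingredient)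

-- ===== LEMMAS AND PROOFS =====

-- a list whose length is not 4 is not the pattern
lemma ne_pat_of_len (s : List Int) (h : s.length ≠ 4) : s ≠ ([1, 2, 3, 1] : List Int) := by
  intro he; rw [he] at h; simp at h

lemma stepB_no (s : List Int) (a x : Int)
    (h : (s ++ [x]).drop ((s ++ [x]).length - 4) ≠ ([1, 2, 3, 1] : List Int)) :
    stepB (s, a) x = (s ++ [x], a) := by
  simp only [stepB]
  rw [if_neg h]

-- the count component of B's fold is additive in the accumulator
lemma foldl_stepB_shift (v : List Int) : ∀ (s : List Int) (a : Int),
    List.foldl stepB (s, a) v = ((List.foldl stepB (s, 0) v).1, a + (List.foldl stepB (s, 0) v).2) := by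
  induction v with
  | nil => intro s a; simp
  | cons x v ih =>
      intro s a
      simp only [List.foldl_cons]
      have hx : stepB (s, a) x = ((stepB (s, 0) x).1, a + (stepB (s, 0) x).2) := by
        simp only [stepB]
        split <;> simp
      rw [hx, ih ((stepB (s, 0) x).1) (a + (stepB (s, 0) x).2),
          ih ((stepB (s, 0) x).1) ((stepB (s, 0) x).2)]
      simp [add_assoc]

-- no full window of p equals the pattern
def NoWin (p : List Int) : Prop := ∀ j : Nat, (p.drop j).take 4 ≠ ([1, 2, 3, 1] : List Int)

-- B's fold over a pattern-free list pushes everything and counts nothing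
lemma foldl_stepB_nowin (p : List Int) (hp : NoWin p) : ∀ a : Int,
    List.foldl stepB (([] : List Int), a) p = (p, a) := by
  induction p using List.reverseRecOn with
  | nil => intro a; simp
  | append_singleton p x ih =>
      intro a
      have hp' : NoWin p := by
        intro j
        by_cases hj : j + 4 ≤ p.length
        · have he : ((p ++ [x]).drop j).take 4 = (p.drop j).take 4 := by
            rw [List.drop_append_of_le_length (by omega),
                List.take_append_of_le_length (by simp only [List.length_drop]; omega)]
          rw [← he]; exact hp j
        · exact ne_pat_of_len _ (by simp only [List.length_take, List.length_drop]; omega)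
      rw [List.foldl_append, ih hp']
      simp only [List.foldl_cons, List.foldl_nil]
      apply stepB_no
      by_cases hl : 4 ≤ (p ++ [x]).length
      · have ht : ((p ++ [x]).drop ((p ++ [x]).length - 4)).take 4
            = (p ++ [x]).drop ((p ++ [x]).length - 4) := by
          apply List.take_of_length_le
          simp only [List.length_drop]
          omega
        rw [← ht]; exact hp ((p ++ [x]).length - 4)
      · exact ne_pat_of_len _ (by simp only [List.length_drop]; omega)

-- the last-four check can pass only at the 1st or 4th element of a pushed [1,2,3,1]
lemma nopop1 (p : List Int) (h1 : p.drop (p.length - 3) ≠ ([1, 2, 3] : List Int)) :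
    (p ++ [1]).drop ((p ++ [1]).length - 4) ≠ ([1, 2, 3, 1] : List Int) := by
  by_cases h3 : 3 ≤ p.length
  · have hd : (p ++ [1]).drop ((p ++ [1]).length - 4) = p.drop (p.length - 3) ++ [1] := by
      have : (p ++ [1]).length - 4 = p.length - 3 := by simp only [List.length_append, List.length_cons, List.length_nil]; omega
      rw [this, List.drop_append_of_le_length (by omega)]
    rw [hd]
    intro hc
    have hc' : p.drop (p.length - 3) ++ [(1:Int)] = [1, 2, 3] ++ [1] := by simpa using hc
    have := List.append_inj hc' (by simp only [List.length_drop, List.length_cons, List.length_nil]; omega)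
    exact h1 this.1
  · exact ne_pat_of_len _ (by simp only [List.length_drop, List.length_append, List.length_cons, List.length_nil]; omega)

lemma nopop2 (p : List Int) :
    (p ++ [1, 2]).drop ((p ++ [1, 2]).length - 4) ≠ ([1, 2, 3, 1] : List Int) := by
  by_cases h2 : 2 ≤ p.length
  · have hd : (p ++ [1, 2]).drop ((p ++ [1, 2]).length - 4) = p.drop (p.length - 2) ++ [1, 2] := by
      have : (p ++ [1, 2]).length - 4 = p.length - 2 := by simp only [List.length_append, List.length_cons, List.length_nil]; omega
      rw [this, List.drop_append_of_le_length (by omega)]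
    rw [hd]
    intro hc
    have hc' : p.drop (p.length - 2) ++ [(1:Int), 2] = [1, 2] ++ [3, 1] := by simpa using hc
    have := List.append_inj hc' (by simp only [List.length_drop, List.length_cons, List.length_nil]; omega)
    simp at this
  · exact ne_pat_of_len _ (by simp only [List.length_drop, List.length_append, List.length_cons, List.length_nil]; omega)

lemma nopop3 (p : List Int) :
    (p ++ [1, 2, 3]).drop ((p ++ [1, 2, 3]).length - 4) ≠ ([1, 2, 3, 1] : List Int) := by
  by_cases h2 : 1 ≤ p.length
  · have hd : (p ++ [1, 2, 3]).drop ((p ++ [1, 2, 3]).length - 4)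
        = p.drop (p.length - 1) ++ [1, 2, 3] := by
      have : (p ++ [1, 2, 3]).length - 4 = p.length - 1 := by simp only [List.length_append, List.length_cons, List.length_nil]; omega
      rw [this, List.drop_append_of_le_length (by omega)]
    rw [hd]
    intro hc
    have hc' : p.drop (p.length - 1) ++ [(1:Int), 2, 3] = [1] ++ [2, 3, 1] := by simpa using hc
    have := List.append_inj hc' (by simp only [List.length_drop, List.length_cons, List.length_nil]; omega)
    simp at this
  · exact ne_pat_of_len _ (by simp only [List.length_drop, List.length_append, List.length_cons, List.length_nil]; omega)

-- feeding the pattern to B's fold on a stack not ending in [1,2,3]: one pop, count + 1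
lemma foldl_stepB_pat (p : List Int) (a : Int)
    (h1 : p.drop (p.length - 3) ≠ ([1, 2, 3] : List Int)) :
    List.foldl stepB (p, a) ([1, 2, 3, 1] : List Int) = (p, a + 1) := by
  simp only [List.foldl_cons, List.foldl_nil]
  rw [stepB_no p a 1 (nopop1 p h1)]
  rw [stepB_no (p ++ [1]) a 2 (by simpa using nopop2 p)]
  rw [stepB_no (p ++ [1] ++ [2]) a 3 (by simpa using nopop3 p)]
  have e4 : p ++ [(1:Int)] ++ [2] ++ [3] ++ [1] = p ++ [1, 2, 3, 1] := by simp
  have hlen4 : (p ++ [(1:Int)] ++ [2] ++ [3] ++ [1]).length - 4 = p.length := by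
    simp only [List.length_append, List.length_cons, List.length_nil]; omega
  simp only [stepB]
  rw [if_pos]
  · rw [hlen4, e4, List.take_left]
  · rw [hlen4, e4, List.drop_left]

-- main loop invariant
lemma loop_eq (l : List Int) (idx ans : Int) (h2 : -2 ≤ idx)
    (hw : ∀ j : Nat, (j : Int) < idx → (l.drop j).take 4 ≠ ([1, 2, 3, 1] : List Int)) :
    solutionLoop l idx ans = ans + (List.foldl stepB (([] : List Int), 0) l).2 := by
  rw [solutionLoop]
  split_ifs with hlt hm
  · -- match at idx: delete, step back, count one
    have hidx : 0 ≤ idx := by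
      by_contra hneg
      rw [Int.not_le] at hneg
      apply ne_pat_of_len _ _ hm
      rw [PySem.List.length_slice]
      simp only [PySem.List.clampIdx]
      split_ifs <;> omega
    set j := idx.toNat with hjdef
    have hj : idx = (j : Int) := (Int.toNat_of_nonneg hidx).symm
    have hlen : PySem.List.clampIdx l.length (idx + 4) - PySem.List.clampIdx l.length idx = 4 := by
      rw [← PySem.List.length_slice, hm]
      rfl
    rw [hj] at hlen
    rw [show ((j : Int) + 4) = ((j + 4 : Nat) : Int) by push_cast; ring] at hlen
    rw [PySem.List.clampIdx_natCast, PySem.List.clampIdx_natCast] at hlen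
    have hjle : j + 4 ≤ l.length := by omega
    have hc1 : PySem.List.clampIdx l.length idx = j := by
      rw [hj, PySem.List.clampIdx_natCast]; omega
    have hc2 : PySem.List.clampIdx l.length (idx + 4) = j + 4 := by
      rw [hj, show ((j : Int) + 4) = ((j + 4 : Nat) : Int) by push_cast; ring,
          PySem.List.clampIdx_natCast]; omega
    have hwin : (l.drop j).take 4 = ([1, 2, 3, 1] : List Int) := by
      have hm' := hm
      rw [hj, show ((j : Int) + 4) = ((j + 4 : Nat) : Int) by push_cast; ring,
          PySem.List.slice_natCast] at hm'
      simpa using hm'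
    have hpl : (l.take j).length = j := by
      rw [List.length_take]; omega
    have hdj : l.drop j = [1, 2, 3, 1] ++ l.drop (j + 4) := by
      conv_lhs => rw [← List.take_append_drop 4 (l.drop j)]
      rw [hwin, List.drop_drop]
    have hl : l = l.take j ++ ([1, 2, 3, 1] ++ l.drop (j + 4)) := by
      conv_lhs => rw [← List.take_append_drop j l, hdj]
    -- the crucial consequence of "no window before idx matched": l.take j does not end in [1,2,3]
    have key : ∀ k : Nat, k + 3 = j → (l.take j).drop k ≠ ([1, 2, 3] : List Int) := by
      intro k hk3 hc
      apply hw k (by omega)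
      have hdk : l.drop k = (l.take j).drop k ++ ([1, 2, 3, 1] ++ l.drop (j + 4)) := by
        conv_lhs => rw [hl]
        rw [List.drop_append_of_le_length (by omega)]
      rw [hdk, hc]
      rfl
    have hnwp : NoWin (l.take j) := by
      intro k
      by_cases hk4 : k + 4 ≤ j
      · have he : ((l.take j).drop k).take 4 = (l.drop k).take 4 := by
          conv_rhs => rw [hl]
          rw [List.drop_append_of_le_length (by omega),
              List.take_append_of_le_length (by simp only [List.length_drop]; omega)]
        rw [he]
        exact hw k (by omega)
      · exact ne_pat_of_len _ (by simp only [List.length_take, List.length_drop]; omega)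
    have hpend : (l.take j).drop ((l.take j).length - 3) ≠ ([1, 2, 3] : List Int) := by
      by_cases h3 : 3 ≤ j
      · rw [hpl]
        exact key (j - 3) (by omega)
      · intro hc
        have := congrArg List.length hc
        simp only [List.length_drop, List.length_cons, List.length_nil] at this
        omega
    -- the deleted list is take j ++ drop (j+4)
    rw [hc1, hc2, show max j (j + 4) = j + 4 by omega]
    -- recursive call
    rw [loop_eq (l.take j ++ l.drop (j + 4)) (idx - 3 + 1) (ans + 1) (by omega) ?hw']
    case hw' =>
      intro k hk
      have hkj : k + 3 ≤ j := by omega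
      rw [List.drop_append_of_le_length (by omega)]
      by_cases hk4 : k + 4 ≤ j
      · have he : (((l.take j).drop k) ++ l.drop (j + 4)).take 4 = ((l.take j).drop k).take 4 := by
          rw [List.take_append_of_le_length (by simp only [List.length_drop]; omega)]
        rw [he]
        exact hnwp k
      · -- k + 3 = j: the window is (take j).drop k ++ first of the rest
        have hk3 : k + 3 = j := by omega
        have hdl : ((l.take j).drop k).length = 3 := by
          simp only [List.length_drop]; omega
        rw [List.take_append, hdl, List.take_of_length_le (by omega)]
        intro hc
        by_cases hr : l.drop (j + 4) = []
        · rw [hr] at hc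
          have := congrArg List.length hc
          simp only [List.length_append, List.length_take,
            List.length_cons, List.length_nil, hdl] at this
          omega
        · obtain ⟨y, r', hry⟩ := List.exists_cons_of_ne_nil hr
          rw [hry] at hc
          simp only [List.take_succ_cons, List.take_zero] at hc
          have hc' : (l.take j).drop k ++ [y] = [1, 2, 3] ++ [1] := by simpa using hc
          have := List.append_inj hc' (by rw [hdl]; rfl)
          exact key k hk3 this.1
    -- count identity: C l = 1 + C (take j ++ drop (j+4))
    have hCl : (List.foldl stepB (([] : List Int), 0) l).2
        = 1 + (List.foldl stepB (([] : List Int), 0) (l.take j ++ l.drop (j + 4))).2 := by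
      conv_lhs => rw [hl, ← List.append_assoc]
      rw [List.foldl_append, List.foldl_append, foldl_stepB_nowin _ hnwp,
          foldl_stepB_pat _ _ hpend, List.foldl_append, foldl_stepB_nowin _ hnwp,
          foldl_stepB_shift]
      simp
    rw [hCl]
    ring
  · -- no match: advance idx
    rw [loop_eq l (idx + 1) ans (by omega) ?hw2]
    case hw2 =>
      intro k hk
      by_cases hki : (k : Int) < idx
      · exact hw k hki
      · have hkeq : idx = (k : Int) := by omega
        rw [hkeq] at hm
        rw [show ((k : Int) + 4) = ((k + 4 : Nat) : Int) by push_cast; ring,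
            PySem.List.slice_natCast] at hm
        simpa using hm
  · -- loop exit: idx ≥ len - 2, so l has no window at all and B counts 0
    have hnw : NoWin l := by
      intro k
      by_cases hk4 : k + 4 ≤ l.length
      · exact hw k (by omega)
      · exact ne_pat_of_len _ (by simp only [List.length_take, List.length_drop]; omega)
    rw [foldl_stepB_nowin l hnw]
    ring
termination_by (2 * l.length + ((l.length : Int) - idx).toNat)
decreasing_by
  · simp only [List.length_append, List.length_take, List.length_drop]
    omega
  · omega

-- ===== VERDICT (by name: the statement is the Claim_ definition above) =====
theorem solution_spec : Claim_equal_solution := by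
  intro l _
  unfold Spec_solution solution solution_alt
  have := loop_eq l 0 0 (by norm_num) (by intro j hj; omega)
  simpa using this
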